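-- pv_equiv track=rewrite | github.com/captainhcg/leetcode-in-py-and-go | captainhcg/py/188-best-time-to-buy-and-sell-stock-iv.py | helper
-- ===== SOURCE A (Python) =====
-- def helper(prices):
--     profit = 0
--     last_p = prices[0]
--     for p in prices[1:]:
--         if p > last_p:
--             profit += p - last_p
--         last_p = p
--     return profit
-- ===== SOURCE B (Python) =====
-- def helper(prices):
--     profit = 0
--     i = 0
--     n = len(prices)
--     while i < n - 1:
--         # descend to a valley
--         while i < n - 1 and prices[i] >= prices[i + 1]:
--             i += 1
--         valley = prices[i]
--         # ascend to the next peak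
--         while i < n - 1 and prices[i] <= prices[i + 1]:
--             i += 1
--         profit += prices[i] - valley
--     return profit
-- ===== Notes on version B (the rewrite author's own statement) =====
-- stated objective: alternative
-- what changed: Replaces the single pass accumulating every positive consecutive difference with the peak-valley strategy: descend to a local valley, ascend to the next peak, and add peak-valley per monotone rise; Pre_ excludes the empty list, on which A raises IndexError reading the first element.
import Mathlib
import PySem

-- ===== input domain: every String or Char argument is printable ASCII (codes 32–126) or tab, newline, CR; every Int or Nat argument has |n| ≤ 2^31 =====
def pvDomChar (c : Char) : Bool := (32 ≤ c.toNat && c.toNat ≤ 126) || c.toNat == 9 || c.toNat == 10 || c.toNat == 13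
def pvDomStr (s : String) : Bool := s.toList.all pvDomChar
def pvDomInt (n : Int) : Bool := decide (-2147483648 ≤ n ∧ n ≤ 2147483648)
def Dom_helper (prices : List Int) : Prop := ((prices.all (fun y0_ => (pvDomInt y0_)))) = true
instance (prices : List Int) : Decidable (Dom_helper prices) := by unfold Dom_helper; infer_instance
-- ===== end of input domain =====

-- B replaces A's single accumulating pass over positive consecutive differences by the
-- peak-valley strategy (descend to a valley, ascend to a peak, add peak - valley); objective: alternative.

-- ===== PORT A =====
-- the for loop over prices[1:] with state (profit, last_p)
def helperLoopA : List Int → Int → Int → Int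
  | [], profit, _ => profit
  | p :: t, profit, last_p =>
      helperLoopA t (if p > last_p then profit + (p - last_p) else profit) p

def helper (prices : List Int) : Int :=
  match prices with
  | [] => 0              -- A indexes the first element here and raises IndexError; excluded by Pre_helper
  | x :: rest => helperLoopA rest 0 x   -- prices[1:] = rest, last_p = prices[0]

-- ===== PORT B =====
-- the index i into prices is represented by the suffix prices[i:]; each inner while loop
-- 'while i < n-1 and prices[i] ⋈ prices[i+1]: i += 1' is structural recursion on that suffix.
def descendB : List Int → List Int
  | x :: y :: t => if x ≥ y then descendB (y :: t) else x :: y :: t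
  | xs => xs

def ascendB : List Int → List Int
  | x :: y :: t => if x ≤ y then ascendB (y :: t) else x :: y :: t
  | xs => xs

-- outer 'while i < n-1' loop; fuel (initially the list length) only totalizes the recursion
def outerB : Nat → List Int → Int
  | 0, _ => 0
  | k + 1, xs =>
      match descendB xs with
      | [] => 0
      | [_] => 0           -- i reached n-1 while descending: loop exits, contribution 0
      | a :: b :: t => ((ascendB (a :: b :: t)).headD 0 - a) + outerB k (ascendB (a :: b :: t))

def helper_alt (prices : List Int) : Int :=
  outerB prices.length prices

-- ===== PRECONDITION & SPEC =====
-- Pre_ excludes exactly the empty list, on which A raises IndexError reading the first element.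
def Pre_helper (prices : List Int) : Prop := prices ≠ []
instance (prices : List Int) : Decidable (Pre_helper prices) := by unfold Pre_helper; infer_instance
def pvWitness_helper : List Int := ([3, 1, 4, 1, 5])

def Spec_helper (prices : List Int) (out : Int) : Prop := out = helper_alt prices
instance (prices : List Int) (out : Int) : Decidable (Spec_helper prices out) := by unfold Spec_helper; infer_instance

-- ===== CLAIM (what is proved, stated in full; the proofs are below) =====
def Claim_equal_helper : Prop := ∀ (prices : List Int), Dom_helper prices → Pre_helper prices → Spec_helper prices (helper prices)

-- ===== LEMMAS AND PROOFS =====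

-- P xs: the total of positive consecutive differences of xs (the common value)
def posDiffs : List Int → Int
  | x :: y :: t => (if y > x then y - x else 0) + posDiffs (y :: t)
  | _ => 0

theorem helperLoopA_eq (t : List Int) : ∀ (profit last_p : Int),
    helperLoopA t profit last_p = profit + posDiffs (last_p :: t) := by
  induction t with
  | nil => intro profit last_p; simp [helperLoopA, posDiffs]
  | cons p t ih =>
      intro profit last_p
      simp only [helperLoopA, posDiffs]
      rw [ih]
      by_cases h : p > last_p <;> simp [h] <;> try ring

theorem descendB_posDiffs (xs : List Int) : posDiffs (descendB xs) = posDiffs xs := by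
  induction xs with
  | nil => rfl
  | cons x t ih =>
      match t, ih with
      | [], _ => rfl
      | y :: t, ih =>
          simp only [descendB]
          by_cases h : x ≥ y
          · rw [if_pos h, ih]
            have hng : ¬ (y > x) := by omega
            simp only [posDiffs, hng, if_false]
            omega
          · simp [h]

theorem descendB_ne_nil (xs : List Int) (h : xs ≠ []) : descendB xs ≠ [] := by
  induction xs with
  | nil => exact absurd rfl h
  | cons x t ih =>
      match t, ih with
      | [], _ => simp [descendB]
      | y :: t, ih =>
          simp only [descendB]
          by_cases hxy : x ≥ y
          · simpa [hxy] using ih (by simp)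
          · simp [hxy]

theorem descendB_length_le (xs : List Int) : (descendB xs).length ≤ xs.length := by
  induction xs with
  | nil => simp [descendB]
  | cons x t ih =>
      match t, ih with
      | [], _ => simp [descendB]
      | y :: t, ih =>
          simp only [descendB]
          by_cases hxy : x ≥ y
          · simp only [hxy, if_pos]
            calc (descendB (y :: t)).length ≤ (y :: t).length := ih
              _ ≤ (x :: y :: t).length := by simp
          · simp [hxy]

theorem descendB_head_lt (xs : List Int) : ∀ a b t, descendB xs = a :: b :: t → a < b := by
  induction xs with
  | nil => intro a b t h; simp [descendB] at h
  | cons x s ih =>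
      match s, ih with
      | [], _ => intro a b t h; simp [descendB] at h
      | y :: s, ih =>
          intro a b t h
          simp only [descendB] at h
          by_cases hxy : x ≥ y
          · rw [if_pos hxy] at h; exact ih a b t h
          · rw [if_neg hxy] at h
            injection h with h1 hr
            injection hr with h2 _
            subst h1; subst h2
            omega

theorem ascendB_length_le (xs : List Int) : (ascendB xs).length ≤ xs.length := by
  induction xs with
  | nil => simp [ascendB]
  | cons x t ih =>
      match t, ih with
      | [], _ => simp [ascendB]
      | y :: t, ih =>
          simp only [ascendB]
          by_cases hxy : x ≤ y
          · simp only [hxy, if_pos]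
            calc (ascendB (y :: t)).length ≤ (y :: t).length := ih
              _ ≤ (x :: y :: t).length := by simp
          · simp [hxy]

-- ascending to the peak: the rise from the head to the peak plus the rest
theorem ascendB_posDiffs (xs : List Int) (h : xs ≠ []) :
    posDiffs xs = ((ascendB xs).headD 0 - xs.headD 0) + posDiffs (ascendB xs) := by
  induction xs with
  | nil => exact absurd rfl h
  | cons x t ih =>
      match t, ih with
      | [], _ => simp [ascendB, posDiffs]
      | y :: t, ih =>
          simp only [ascendB]
          by_cases hxy : x ≤ y
          · rw [if_pos hxy]
            have ht := ih (by simp)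
            simp only [posDiffs, List.headD_cons] at ht ⊢
            rw [ht]
            by_cases hyx : y > x
            · rw [if_pos hyx]; ring
            · rw [if_neg hyx]
              have : y = x := by omega
              subst this; ring
          · rw [if_neg hxy]
            simp

theorem outerB_eq (fuel : Nat) : ∀ xs : List Int, xs.length ≤ fuel + 1 →
    outerB fuel xs = posDiffs xs := by
  induction fuel with
  | zero =>
      intro xs hlen
      match xs, hlen with
      | [], _ => simp [outerB, posDiffs]
      | [x], _ => simp [outerB, posDiffs]
      | x :: y :: t, hlen => simp at hlen
  | succ k ih =>
      intro xs hlen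
      rw [outerB]
      rcases hd : descendB xs with _ | ⟨a, d⟩
      · cases xs with
        | nil => simp [posDiffs]
        | cons x t => exact absurd hd (descendB_ne_nil _ (by simp))
      · cases d with
        | nil =>
            have hpd := descendB_posDiffs xs
            rw [hd] at hpd
            simp only [posDiffs] at hpd
            exact hpd
        | cons b t =>
            show ((ascendB (a :: b :: t)).headD 0 - a) + outerB k (ascendB (a :: b :: t)) = posDiffs xs
            have hab : a < b := descendB_head_lt xs a b t hd
            have hpd : posDiffs (a :: b :: t) = posDiffs xs := by
              rw [← hd]; exact descendB_posDiffs xs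
            have hasc := ascendB_posDiffs (a :: b :: t) (by simp)
            have hlen2 : (ascendB (a :: b :: t)).length ≤ k + 1 := by
              have h1 : (descendB xs).length ≤ xs.length := descendB_length_le xs
              rw [hd] at h1
              have h2 : (ascendB (a :: b :: t)).length ≤ (b :: t).length := by
                have : ascendB (a :: b :: t) = ascendB (b :: t) := by
                  simp [ascendB, le_of_lt hab]
                rw [this]; exact ascendB_length_le _
              simp at h1 h2 ⊢
              omega
            rw [ih _ hlen2]
            simp only [List.headD_cons] at hasc
            rw [← hpd, hasc]

-- ===== VERDICT (by name: the statement is the Claim_ definition above) =====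
theorem helper_spec : Claim_equal_helper := by
  intro prices _ hpre
  unfold Spec_helper
  match prices, hpre with
  | [], hpre => exact absurd rfl hpre
  | x :: t, _ =>
      show helperLoopA t 0 x = outerB (x :: t).length (x :: t)
      rw [helperLoopA_eq, outerB_eq ((x :: t).length) (x :: t) (by simp)]
      omega
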